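-- pv_equiv track=rewrite | github.com/nattigy/competitive_programming | bootcamp 2021 fall/contest-12/E. Pair of Topics.py | pairOfTopics
-- ===== SOURCE A (Python) =====
-- def pairOfTopics(t, s, n):
--     count = 0
--     diff = []
--     for i in range(n):
--         diff.append(t[i] - s[i])
--     diff.sort()
--     i = 0
--     j = n - 1
--     while i < j:
--         if diff[i] + diff[j] > 0:
--             count += j - i
--             j -= 1
--         else:
--             i += 1
--     return count
-- ===== SOURCE B (Python) =====
-- def pairOfTopics(t, s, n):
--     # direct pair count: no sort, no two-pointer sweep
--     d = [t[i] - s[i] for i in range(n)]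
--     count = 0
--     for k, x in enumerate(d):
--         for y in d[k + 1:]:
--             if x + y > 0:
--                 count += 1
--     return count
-- ===== Notes on version B (the rewrite author's own statement) =====
-- stated objective: alternative
-- what changed: Replaces the sort + two-pointer sweep with a direct nested-loop count of pairs i<j with d[i]+d[j]>0 over the unsorted difference list.
import Mathlib
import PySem

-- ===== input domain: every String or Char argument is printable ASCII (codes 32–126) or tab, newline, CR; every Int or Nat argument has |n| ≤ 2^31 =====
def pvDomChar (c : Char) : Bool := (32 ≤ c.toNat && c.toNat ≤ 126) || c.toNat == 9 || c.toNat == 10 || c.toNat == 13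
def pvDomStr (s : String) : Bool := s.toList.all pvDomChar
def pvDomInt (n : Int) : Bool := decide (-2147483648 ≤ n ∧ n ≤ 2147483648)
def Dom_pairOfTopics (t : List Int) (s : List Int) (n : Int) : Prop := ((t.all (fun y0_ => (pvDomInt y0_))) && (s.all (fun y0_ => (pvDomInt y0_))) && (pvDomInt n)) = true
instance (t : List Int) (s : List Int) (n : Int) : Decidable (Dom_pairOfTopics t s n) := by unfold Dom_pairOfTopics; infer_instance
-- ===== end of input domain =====

-- B replaces A's sort + two-pointer sweep by a direct nested-loop count of
-- pairs i<j with d[i]+d[j] > 0 over the unsorted difference list (alternative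
-- decomposition, not faster).

-- ===== PORT A =====
-- the 'while i < j' two-pointer sweep of A, step for step
def ptLoop (d : List Int) (i j count : Int) : Int :=
  if _h : i < j then
    if PySem.List.pyGetD d i 0 + PySem.List.pyGetD d j 0 > 0 then
      ptLoop d i (j - 1) (count + (j - i))
    else
      ptLoop d (i + 1) j count
  else count
termination_by (j - i).toNat
decreasing_by all_goals omega

def pairOfTopics (t : List Int) (s : List Int) (n : Int) : Int :=
  let diff := (PySem.List.pyRange 0 n 1).foldl
    (fun acc i => acc ++ [PySem.List.pyGetD t i 0 - PySem.List.pyGetD s i 0]) []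
  let diff := PySem.List.sorted diff (fun x => x) false
  ptLoop diff 0 (n - 1) 0

-- ===== PORT B =====
def pairOfTopics_alt (t : List Int) (s : List Int) (n : Int) : Int :=
  let d := (PySem.List.pyRange 0 n 1).map
    (fun i => PySem.List.pyGetD t i 0 - PySem.List.pyGetD s i 0)
  (PySem.List.enumerate d 0).foldl
    (fun count kx =>
      (PySem.List.slice d (some (kx.1 + 1)) none).foldl
        (fun c y => if kx.2 + y > 0 then c + 1 else c) count) 0

-- ===== PRECONDITION & SPEC =====
-- A raises IndexError iff n exceeds the length of t or s (for 0 < n); Pre_ excludes exactly those inputs.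
def Pre_pairOfTopics (t : List Int) (s : List Int) (n : Int) : Prop :=
  n ≤ (t.length : Int) ∧ n ≤ (s.length : Int)
instance (t : List Int) (s : List Int) (n : Int) : Decidable (Pre_pairOfTopics t s n) := by
  unfold Pre_pairOfTopics; infer_instance

def pvWitness_pairOfTopics : List Int × List Int × Int := ([3, 1], [1, 2], 2)

def Spec_pairOfTopics (t : List Int) (s : List Int) (n : Int) (out : Int) : Prop := out = pairOfTopics_alt t s n
instance (t : List Int) (s : List Int) (n : Int) (out : Int) : Decidable (Spec_pairOfTopics t s n out) := by unfold Spec_pairOfTopics; infer_instance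

-- ===== CLAIM (what is proved, stated in full; the proofs are below) =====
def Claim_equal_pairOfTopics : Prop := ∀ (t : List Int) (s : List Int) (n : Int), Dom_pairOfTopics t s n → Pre_pairOfTopics t s n → Spec_pairOfTopics t s n (pairOfTopics t s n)

-- ===== LEMMAS AND PROOFS =====

-- number of pairs of positions p < q with l[p] + l[q] > 0
def pairCount : List Int → Int
  | [] => 0
  | x :: xs => (xs.countP (fun y => decide (0 < x + y)) : Int) + pairCount xs

theorem pairCount_perm {l₁ l₂ : List Int} (h : l₁.Perm l₂) : pairCount l₁ = pairCount l₂ := by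
  induction h with
  | nil => rfl
  | cons x _ ih =>
      simp [pairCount, ih, List.Perm.countP_eq _ (by assumption)]
  | swap x y l =>
      simp [pairCount, List.countP_cons]
      by_cases hc : 0 < x + y
      · rw [if_pos hc, if_pos (by omega : 0 < y + x)]; ring
      · rw [if_neg hc, if_neg (by omega : ¬ 0 < y + x)]; ring
  | trans _ _ ih₁ ih₂ => rw [ih₁, ih₂]

theorem pairCount_append_singleton (ys : List Int) (z : Int) :
    pairCount (ys ++ [z]) = (ys.countP (fun y => decide (0 < y + z)) : Int) + pairCount ys := by
  induction ys with
  | nil => simp [pairCount]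
  | cons y ys ih =>
      simp [pairCount, List.countP_append, List.countP_cons, ih]
      ring

theorem pairCount_singleton (x : Int) : pairCount [x] = 0 := by simp [pairCount]

-- the two-pointer sweep counts the positive pairs of the window [i..j] of a sorted list
theorem ptLoop_eq (L : List Int)
    (hmono : ∀ (p q : Nat) (hpq : p ≤ q) (hq : q < L.length), L[p]'(by omega) ≤ L[q]'hq) :
    ∀ (m : Nat) (i j c : Int), (j - i).toNat = m → 0 ≤ i → 0 ≤ j → j < (L.length : Int) →
      ptLoop L i j c = c + pairCount (PySem.List.slice L (some i) (some (j + 1))) := by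
  intro m
  induction m with
  | zero =>
      intro i j c hm hi hj0 hj
      rw [ptLoop]
      have hij : ¬ i < j := by omega
      simp only [hij, dite_false]
      rw [PySem.List.slice_toNat _ hi (by omega)]
      by_cases hji : j + 1 ≤ i
      · have h0 : (j + 1).toNat - i.toNat = 0 := by omega
        rw [h0]
        simp [pairCount]
      · -- i = j : a one-element window
        have hij' : i = j := by omega
        subst hij'
        have h1 : (i + 1).toNat - i.toNat = 1 := by omega
        rw [h1]
        have hlt : i.toNat < L.length := by omega
        have hdc : L.drop i.toNat = L[i.toNat] :: L.drop (i.toNat + 1) :=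
          List.drop_eq_getElem_cons hlt
        rw [hdc, List.take_succ_cons, List.take_zero, pairCount_singleton]; ring
  | succ m ih =>
      intro i j c hm hi hj0 hj
      have hij : i < j := by omega
      have hjn : 0 ≤ j := hj0
      have hjt : j.toNat < L.length := by omega
      have hit : i.toNat < L.length := by omega
      have hgi : PySem.List.pyGetD L i 0 = L[i.toNat] :=
        PySem.List.pyGetD_eq_getElem L 0 hi (by omega)
      have hgj : PySem.List.pyGetD L j 0 = L[j.toNat] :=
        PySem.List.pyGetD_eq_getElem L 0 hjn hj
      -- the window as drop/take
      have hseg : ∀ (a b : Int), 0 ≤ a → 0 ≤ b →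
          PySem.List.slice L (some a) (some b) = (L.drop a.toNat).take (b.toNat - a.toNat) := by
        intro a b ha hb; exact PySem.List.slice_toNat _ ha hb
      rw [ptLoop]
      simp only [hij, dite_true, hgi, hgj]
      by_cases hpos : L[i.toNat] + L[j.toNat] > 0
      · simp only [hpos, if_true]
        rw [ih i (j - 1) (c + (j - i)) (by omega) hi (by omega) (by omega)]
        -- window [i..j] = window [i..j-1] ++ [L[j]], and L[j] pairs with all j-i earlier elements
        have hjj : (j - 1 + 1) = j := by ring
        rw [hjj, hseg i j hi hjn, hseg i (j+1) hi (by omega)]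
        have e1 : (j + 1).toNat - i.toNat = (j.toNat - i.toNat) + 1 := by omega
        rw [e1]
        have hlen : (L.drop i.toNat).length = L.length - i.toNat := by simp
        have hkl : j.toNat - i.toNat < (L.drop i.toNat).length := by omega
        have e2 : (L.drop i.toNat).take (j.toNat - i.toNat + 1)
            = (L.drop i.toNat).take (j.toNat - i.toNat) ++ [(L.drop i.toNat)[j.toNat - i.toNat]] := by
          rw [List.take_add_one]
          simp [List.getElem?_eq_getElem hkl]
        have e3 : (L.drop i.toNat)[j.toNat - i.toNat]'hkl = L[j.toNat] := by
          rw [List.getElem_drop]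
          congr 1; omega
        rw [e2, e3, pairCount_append_singleton]
        have hall : ∀ y ∈ (L.drop i.toNat).take (j.toNat - i.toNat), (fun y => decide (0 < y + L[j.toNat])) y = true := by
          intro y hy
          obtain ⟨w, hw, hyw⟩ := List.mem_iff_getElem.mp hy
          have hwlen : w < j.toNat - i.toNat := by
            have := hw; simp at this; omega
          have hyv : y = L[i.toNat + w]'(by omega) := by
            rw [← hyw]; rw [List.getElem_take, List.getElem_drop]
          have hle : L[i.toNat]'hit ≤ L[i.toNat + w]'(by omega) := hmono _ _ (by omega) (by omega)
          simp only [decide_eq_true_iff]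
          rw [hyv]; omega
        have hcnt : ((L.drop i.toNat).take (j.toNat - i.toNat)).countP (fun y => decide (0 < y + L[j.toNat])) = ((L.drop i.toNat).take (j.toNat - i.toNat)).length := by
          rw [List.countP_eq_length]; exact hall
        rw [hcnt]
        have hlen2 : ((L.drop i.toNat).take (j.toNat - i.toNat)).length = j.toNat - i.toNat := by
          simp; omega
        rw [hlen2]
        have : ((j.toNat - i.toNat : Nat) : Int) = j - i := by omega
        rw [this]; ring
      · simp only [hpos, if_false]
        rw [ih (i+1) j c (by omega) (by omega) hj0 hj]
        -- window [i..j] = L[i] :: window [i+1..j], and L[i] pairs with none of them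
        rw [hseg i (j+1) hi (by omega), hseg (i+1) (j+1) (by omega) (by omega)]
        have e1 : L.drop i.toNat = L[i.toNat] :: L.drop (i.toNat + 1) := List.drop_eq_getElem_cons hit
        have e2 : (i + 1).toNat = i.toNat + 1 := by omega
        rw [e1, e2]
        have e3 : (j+1).toNat - i.toNat = ((j+1).toNat - (i.toNat + 1)) + 1 := by omega
        rw [e3, List.take_succ_cons, pairCount]
        have hzero : (((L.drop (i.toNat + 1)).take ((j+1).toNat - (i.toNat+1))).countP (fun y => decide (0 < L[i.toNat] + y))) = 0 := by
          rw [List.countP_eq_zero]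
          intro y hy
          obtain ⟨w, hw, hyw⟩ := List.mem_iff_getElem.mp hy
          have hwlen : w < (j+1).toNat - (i.toNat + 1) := by
            have := hw; simp at this; omega
          have hyv : y = L[i.toNat + 1 + w]'(by omega) := by
            rw [← hyw]; rw [List.getElem_take, List.getElem_drop]
          have hle : L[i.toNat + 1 + w]'(by omega) ≤ L[j.toNat]'hjt := hmono _ _ (by omega) hjt
          simp only [decide_eq_true_iff]
          rw [hyv]; omega
        rw [hzero]; simp
  
-- B's nested loop over (k, x) with inner pass over d[k+1:] computes pairCount d
theorem alt_fold_eq (d : List Int) :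
    ∀ (u : List Int) (k c : Int), 0 ≤ k → d.drop k.toNat = u →
      (PySem.List.enumerate u k).foldl
        (fun count kx =>
          (PySem.List.slice d (some (kx.1 + 1)) none).foldl
            (fun c y => if kx.2 + y > 0 then c + 1 else c) count) c
      = c + pairCount u := by
  intro u
  induction u with
  | nil => intro k c _ _; simp [PySem.List.enumerate_nil, pairCount]
  | cons x v ih =>
      intro k c hk hdrop
      rw [PySem.List.enumerate_cons, List.foldl_cons]
      have hslice : PySem.List.slice d (some (k + 1)) none = v := by
        rw [PySem.List.slice_from _ (by omega)]
        have : (k + 1).toNat = k.toNat + 1 := by omega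
        rw [this, ← List.drop_drop, hdrop]
        simp
      simp only [hslice]
      rw [PySem.List.foldl_ite_add_one]
      rw [ih (k + 1) _ (by omega) (by
        have : (k + 1).toNat = k.toNat + 1 := by omega
        rw [this, ← List.drop_drop, hdrop]; simp)]
      show c + ↑(List.countP (fun y => decide (x + y > 0)) v) + pairCount v = c + pairCount (x :: v)
      have : (fun y => decide (x + y > 0)) = (fun y => decide (0 < x + y)) := by
        funext y; simp [gt_iff_lt]
      rw [this, pairCount]; ring

-- ===== VERDICT (by name: the statement is the Claim_ definition above) =====
theorem pairOfTopics_spec : Claim_equal_pairOfTopics := by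
  intro t s n _hdom hpre
  unfold Spec_pairOfTopics pairOfTopics pairOfTopics_alt
  rw [PySem.List.foldl_append_singleton_eq_map]
  simp only [List.nil_append]
  set d := (PySem.List.pyRange 0 n 1).map
    (fun i => PySem.List.pyGetD t i 0 - PySem.List.pyGetD s i 0) with hd
  set L := PySem.List.sorted d (fun x => x) false with hL
  have hlenL : L.length = d.length := PySem.List.length_sorted ..
  have hlend : d.length = (n - 0).toNat := by
    rw [hd, List.length_map, PySem.List.length_pyRange_one]
  have halt : (PySem.List.enumerate d 0).foldl
        (fun count kx =>
          (PySem.List.slice d (some (kx.1 + 1)) none).foldl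
            (fun c y => if kx.2 + y > 0 then c + 1 else c) count) 0
      = pairCount d := by
    have := alt_fold_eq d d 0 0 (by omega) (by simp)
    simpa using this
  rw [halt]
  by_cases hn : n ≤ 0
  · have hd0 : d = [] := by
      rw [hd, PySem.List.pyRange_one_eq_nil hn]; rfl
    have hL0 : L = [] := by rw [hL, hd0]; rfl
    rw [ptLoop, dif_neg (by omega : ¬ (0:Int) < n - 1)]
    simp [hd0, pairCount]
  · push_neg at hn
    have hmono : ∀ (p q : Nat) (hpq : p ≤ q) (hq : q < L.length), L[p]'(by omega) ≤ L[q]'hq := by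
      intro p q hpq hq
      exact PySem.List.sorted_id_getElem_mono d hpq hq
    have hlen : L.length = n.toNat := by omega
    rw [ptLoop_eq L hmono (n - 1 - 0).toNat 0 (n - 1) 0 rfl (by omega) (by omega) (by omega)]
    have : PySem.List.slice L (some 0) (some (n - 1 + 1)) = L := by
      have e : n - 1 + 1 = n := by ring
      rw [e, PySem.List.slice_toNat _ (by omega) (by omega)]
      simp [hlen]
    rw [this]
    have hperm : L.Perm d := PySem.List.sorted_perm ..
    rw [pairCount_perm hperm]; ring
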